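-- pv_equiv track=rewrite | github.com/STARC00KIE/coding_study | 프로그래머스/0/120815. 피자 나눠 먹기 （2）/피자 나눠 먹기 （2）.py | solution
-- ===== SOURCE A (Python) =====
-- def solution(n):
--     pizza = 0
--     cnt = 1
--     while True:
--         pizza += 6
--         if pizza % n == 0:
--             return cnt
--         else:
--             cnt +=1
-- ===== SOURCE B (Python) =====
-- def solution(n):
--     m = abs(n)
--     g = (2 if m % 2 == 0 else 1) * (3 if m % 3 == 0 else 1)
--     return m // g
-- ===== Notes on version B (the rewrite author's own statement) =====
-- stated objective: faster
-- what changed: Replaces A's trial loop (add 6 until divisible by n) with the closed form |n| // gcd(6, |n|), the gcd computed by the two divisibility tests m%2 and m%3.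
import Mathlib
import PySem

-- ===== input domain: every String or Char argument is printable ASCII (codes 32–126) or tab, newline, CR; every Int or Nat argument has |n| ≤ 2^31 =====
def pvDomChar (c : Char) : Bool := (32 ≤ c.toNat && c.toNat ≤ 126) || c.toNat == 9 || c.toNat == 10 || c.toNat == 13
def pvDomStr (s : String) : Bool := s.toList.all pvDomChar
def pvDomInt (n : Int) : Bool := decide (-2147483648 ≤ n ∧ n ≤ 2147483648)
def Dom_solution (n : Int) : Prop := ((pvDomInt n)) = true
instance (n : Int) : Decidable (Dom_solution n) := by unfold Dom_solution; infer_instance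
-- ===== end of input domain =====

-- B replaces A's O(n) trial loop by the closed form |n| // gcd(6, |n|) (gcd written out
-- by the two divisibility tests), an O(1) computation.

-- ===== PORT A =====
-- A's 'while True' loop, with fuel |n| (enough under Pre_: the answer is ≤ |n|);
-- the fuel-0 branch is unreachable for n ≠ 0.
def solutionLoop (n : Int) : Nat → Int → Int → Int
  | 0, _pizza, cnt => cnt
  | fuel+1, pizza, cnt =>
    let pizza' := pizza + 6
    if PySem.Int.mod pizza' n = 0 then cnt
    else solutionLoop n fuel pizza' (cnt + 1)

def solution (n : Int) : Int := solutionLoop n n.natAbs 0 1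

-- ===== PORT B =====
def solution_alt (n : Int) : Int :=
  let m := |n|
  let g := (if PySem.Int.mod m 2 = 0 then (2 : Int) else 1) *
           (if PySem.Int.mod m 3 = 0 then (3 : Int) else 1)
  PySem.Int.floordiv m g

-- ===== PRECONDITION & SPEC =====
-- Pre_ excludes exactly n = 0, where A's 'pizza % n' raises ZeroDivisionError.
def Pre_solution (n : Int) : Prop := n ≠ 0
instance (n : Int) : Decidable (Pre_solution n) := by unfold Pre_solution; infer_instance
def pvWitness_solution : Int := (10)

def Spec_solution (n : Int) (out : Int) : Prop := out = solution_alt n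
instance (n : Int) (out : Int) : Decidable (Spec_solution n out) := by unfold Spec_solution; infer_instance

-- ===== CLAIM (what is proved, stated in full; the proofs are below) =====
def Claim_equal_solution : Prop := ∀ (n : Int), Dom_solution n → Pre_solution n → Spec_solution n (solution n)

-- ===== LEMMAS AND PROOFS =====

-- g as computed by B, for m = |n|
def pvG (m : Int) : Int :=
  (if PySem.Int.mod m 2 = 0 then (2 : Int) else 1) *
  (if PySem.Int.mod m 3 = 0 then (3 : Int) else 1)

lemma pvG_pos (m : Int) : 0 < pvG m := by
  unfold pvG; split_ifs <;> norm_num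

lemma pvG_dvd (m : Int) : pvG m ∣ m := by
  unfold pvG
  split_ifs with h2 h3 h3
  · rw [PySem.Int.mod_eq_zero_iff_dvd] at h2 h3
    exact (Int.isCoprime_iff_gcd_eq_one.mpr rfl).mul_dvd h2 h3
  · simpa using (PySem.Int.mod_eq_zero_iff_dvd m 2).mp h2
  · simpa using (PySem.Int.mod_eq_zero_iff_dvd m 3).mp h3
  · simp

lemma alt_mul_g (n : Int) : solution_alt n * pvG (|n|) = |n| := by
  have hg := pvG_dvd (|n|)
  have hpos := pvG_pos (|n|)
  show PySem.Int.floordiv (|n|) (pvG (|n|)) * pvG (|n|) = |n|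
  rw [PySem.Int.floordiv_eq_ediv_of_pos hpos]
  exact Int.ediv_mul_cancel hg

lemma alt_pos (n : Int) (hn : n ≠ 0) : 0 < solution_alt n := by
  have h := alt_mul_g n
  have hm : 0 < |n| := abs_pos.mpr hn
  rcases lt_or_ge 0 (solution_alt n) with hp | hp
  · exact hp
  · exfalso; nlinarith [pvG_pos (|n|)]

-- the key divisibility characterisation: m ∣ 6c ↔ k ∣ c with k = m / gcd(6, m)
lemma key_dvd (n c : Int) (hn : n ≠ 0) : |n| ∣ 6 * c ↔ solution_alt n ∣ c := by
  set m := |n| with hm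
  set k := solution_alt n with hk
  have hkg : k * pvG m = m := alt_mul_g n
  have hkpos : 0 < k := alt_pos n hn
  unfold pvG at hkg
  by_cases h2 : PySem.Int.mod m 2 = 0 <;> by_cases h3 : PySem.Int.mod m 3 = 0
  · -- 6 ∣ m, m = 6k
    rw [if_pos h2, if_pos h3, show k * (2 * 3) = 6 * k by ring] at hkg
    rw [← hkg]
    exact mul_dvd_mul_iff_left (by norm_num : (6:Int) ≠ 0)
  · -- m = 2k, 3 ∤ m hence 3 ∤ k
    rw [if_pos h2, if_neg h3, show k * (2 * 1) = 2 * k by ring] at hkg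
    rw [PySem.Int.mod_eq_zero_iff_dvd] at h3
    have h3k : ¬ (3 : Int) ∣ k := fun h => h3 (by rw [← hkg]; exact h.mul_left 2)
    have hco : IsCoprime (k : Int) 3 := (Int.prime_three.coprime_iff_not_dvd.mpr h3k).symm
    rw [← hkg]
    constructor
    · intro h
      rw [show 6 * c = 2 * (3 * c) by ring] at h
      exact hco.dvd_of_dvd_mul_left ((mul_dvd_mul_iff_left (by norm_num : (2:Int) ≠ 0)).mp h)
    · rintro ⟨t, rfl⟩; exact ⟨3 * t, by ring⟩
  · -- m = 3k, 2 ∤ m hence 2 ∤ k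
    rw [if_neg h2, if_pos h3, show k * (1 * 3) = 3 * k by ring] at hkg
    rw [PySem.Int.mod_eq_zero_iff_dvd] at h2
    have h2k : ¬ (2 : Int) ∣ k := fun h => h2 (by rw [← hkg]; exact h.mul_left 3)
    have hco : IsCoprime (k : Int) 2 := (Int.prime_two.coprime_iff_not_dvd.mpr h2k).symm
    rw [← hkg]
    constructor
    · intro h
      rw [show 6 * c = 3 * (2 * c) by ring] at h
      exact hco.dvd_of_dvd_mul_left ((mul_dvd_mul_iff_left (by norm_num : (3:Int) ≠ 0)).mp h)
    · rintro ⟨t, rfl⟩; exact ⟨2 * t, by ring⟩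
  · -- m coprime to 6, k = m
    rw [if_neg h2, if_neg h3, mul_one, mul_one] at hkg
    rw [PySem.Int.mod_eq_zero_iff_dvd] at h2 h3
    rw [← hkg] at h2 h3 ⊢
    have hco : IsCoprime (k : Int) 6 := by
      have c2 : IsCoprime (k : Int) 2 := (Int.prime_two.coprime_iff_not_dvd.mpr h2).symm
      have c3 : IsCoprime (k : Int) 3 := (Int.prime_three.coprime_iff_not_dvd.mpr h3).symm
      simpa using c2.mul_right c3
    exact ⟨fun h => hco.dvd_of_dvd_mul_left h, fun h => h.mul_left 6⟩

-- loop invariant: starting at cnt with pizza = 6(cnt-1), the loop returns k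
lemma loop_eq (n : Int) (hn : n ≠ 0) :
    ∀ (fuel : Nat) (cnt : Int), 1 ≤ cnt → cnt ≤ solution_alt n →
      solution_alt n + 1 ≤ cnt + fuel →
      solutionLoop n fuel (6 * (cnt - 1)) cnt = solution_alt n := by
  intro fuel
  induction fuel with
  | zero => intro cnt h1 h2 h3; exfalso; omega
  | succ fuel ih =>
    intro cnt h1 h2 h3
    set k := solution_alt n with hk
    simp only [solutionLoop]
    have hpz : 6 * (cnt - 1) + 6 = 6 * cnt := by ring
    rw [hpz]
    have hmod : PySem.Int.mod (6 * cnt) n = 0 ↔ k ∣ cnt := by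
      rw [PySem.Int.mod_eq_zero_iff_dvd, ← abs_dvd, key_dvd n cnt hn]
    by_cases hc : cnt = k
    · rw [if_pos (hmod.mpr (hc ▸ dvd_refl k))]; exact hc
    · have hlt : cnt < k := lt_of_le_of_ne h2 hc
      rw [if_neg (by rw [hmod]; intro h; exact absurd (Int.le_of_dvd (by omega) h) (by omega))]
      have := ih (cnt + 1) (by omega) (by omega) (by omega)
      rw [show 6 * cnt = 6 * (cnt + 1 - 1) by ring]
      exact this

-- ===== VERDICT (by name: the statement is the Claim_ definition above) =====
theorem solution_spec : Claim_equal_solution := by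
  intro n _ hn
  show solution n = solution_alt n
  have hk1 : 1 ≤ solution_alt n := alt_pos n hn
  have hkm : solution_alt n ≤ |n| := by
    nlinarith [alt_mul_g n, pvG_pos (|n|), alt_pos n hn]
  have hfuel : solution_alt n + 1 ≤ 1 + (n.natAbs : Int) := by
    rw [Int.abs_eq_natAbs] at hkm; omega
  have := loop_eq n hn n.natAbs 1 le_rfl hk1 hfuel
  simpa using this
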